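-- pv_equiv track=rewrite | github.com/break11/AutoStorage | Lib/Common/GraphUtils.py | pathsIntersections
-- ===== SOURCE A (Python) =====
-- def pathsIntersections( path_1, path_2 ):
--     intersections = []
--     i_path = []
--     for nodeID in path_1:
--         if nodeID in path_2:
--             i_path.append( nodeID )
--         elif len(i_path) > 0:
--             intersections.append( i_path )
--             i_path = []
--
--     if len(i_path): intersections.append( i_path )
--     return intersections
-- ===== SOURCE B (Python) =====
-- def pathsIntersections(path_1, path_2):
--     # span-based scan: for each run start, walk to the run's end and slice it out
--     res = []
--     i, n = 0, len(path_1)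
--     while i < n:
--         if path_1[i] in path_2:
--             j = i
--             while j < n and path_1[j] in path_2:
--                 j += 1
--             res.append(path_1[i:j])
--             i = j
--         else:
--             i += 1
--     return res
-- ===== Notes on version B (the rewrite author's own statement) =====
-- stated objective: alternative
-- what changed: Replaces A's accumulator state machine (pending run list flushed on non-member and after the loop) with a span scan that, at each run start, advances to the run's end and slices the run out directly, so no pending state or trailing flush exists.
import Mathlib
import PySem

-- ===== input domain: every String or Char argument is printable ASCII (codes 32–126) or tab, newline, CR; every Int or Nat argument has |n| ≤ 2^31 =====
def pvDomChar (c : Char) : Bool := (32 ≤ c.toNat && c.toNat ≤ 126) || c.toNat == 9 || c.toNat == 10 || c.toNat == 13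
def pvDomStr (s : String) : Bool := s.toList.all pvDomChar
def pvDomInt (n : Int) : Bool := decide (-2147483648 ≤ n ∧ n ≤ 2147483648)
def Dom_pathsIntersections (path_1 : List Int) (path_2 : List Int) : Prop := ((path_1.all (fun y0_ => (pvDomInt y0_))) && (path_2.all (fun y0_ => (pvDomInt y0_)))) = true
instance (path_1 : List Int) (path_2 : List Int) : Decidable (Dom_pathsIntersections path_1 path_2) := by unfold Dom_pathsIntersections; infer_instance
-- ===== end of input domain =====

-- B replaces A's pending-run accumulator/flush state machine with a span scan (take a whole run at its start); alternative decomposition, same cost, return value only.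


-- ===== PORT A =====
-- A: state machine — pending run `i_path` appended on members, flushed on non-members and at the end.
def pathsIntersections (path_1 : List Int) (path_2 : List Int) : List (List Int) :=
  let st := path_1.foldl
    (fun (s : List (List Int) × List Int) nodeID =>
      if nodeID ∈ path_2 then (s.1, s.2 ++ [nodeID])
      else if s.2.length > 0 then (s.1 ++ [s.2], ([] : List Int))
      else s)
    (([] : List (List Int)), ([] : List Int))
  if st.2.length ≠ 0 then st.1 ++ [st.2] else st.1

-- ===== PORT B =====
-- B: span scan — at a run start, take the whole run at once and continue after it.
-- fuel = number of positions left to scan (mirrors the index bound i < n of Source B's while loop)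
def pvAltGo (path_2 : List Int) : Nat → List Int → List (List Int)
  | _, [] => []
  | 0, _ :: _ => []
  | n + 1, x :: xs =>
    if x ∈ path_2 then
      (x :: xs.takeWhile (· ∈ path_2)) :: pvAltGo path_2 n (xs.dropWhile (· ∈ path_2))
    else pvAltGo path_2 n xs

def pathsIntersections_alt (path_1 : List Int) (path_2 : List Int) : List (List Int) :=
  pvAltGo path_2 path_1.length path_1

-- ===== PRECONDITION & SPEC =====
def Spec_pathsIntersections (path_1 : List Int) (path_2 : List Int) (out : List (List Int)) : Prop := out = pathsIntersections_alt path_1 path_2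
instance (path_1 : List Int) (path_2 : List Int) (out : List (List Int)) : Decidable (Spec_pathsIntersections path_1 path_2 out) := by unfold Spec_pathsIntersections; infer_instance

-- ===== CLAIM (what is proved, stated in full; the proofs are below) =====
def Claim_equal_pathsIntersections : Prop := ∀ (path_1 : List Int) (path_2 : List Int), Dom_pathsIntersections path_1 path_2 → Spec_pathsIntersections path_1 path_2 (pathsIntersections path_1 path_2)

-- ===== LEMMAS AND PROOFS =====

-- step function of A's fold, named for the lemmas
def pvStep (path_2 : List Int) (s : List (List Int) × List Int) (nodeID : Int) :
    List (List Int) × List Int :=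
  if nodeID ∈ path_2 then (s.1, s.2 ++ [nodeID])
  else if s.2.length > 0 then (s.1 ++ [s.2], ([] : List Int))
  else s

-- the accumulated output factors out of the fold
theorem pvFold_acc (p2 : List Int) (l : List Int) (acc : List (List Int)) (ip : List Int) :
    List.foldl (pvStep p2) (acc, ip) l =
      (acc ++ (List.foldl (pvStep p2) ([], ip) l).1, (List.foldl (pvStep p2) ([], ip) l).2) := by
  induction l generalizing acc ip with
  | nil => simp
  | cons x xs ih =>
    simp only [List.foldl_cons, pvStep]
    split_ifs with h1 h2
    · simpa using ih acc (ip ++ [x])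
    · rw [ih (acc ++ [ip]) [], ih ([] ++ [ip]) []]
      simp
    · exact ih acc ip

-- the fuel argument is irrelevant once it covers the list's length
theorem pvAltGo_fuel (p2 : List Int) :
    ∀ (m n : Nat) (l : List Int), l.length ≤ m → l.length ≤ n →
      pvAltGo p2 m l = pvAltGo p2 n l := by
  intro m
  induction m with
  | zero =>
    intro n l hm _
    cases l with
    | nil => cases n <;> rfl
    | cons x xs => simp at hm
  | succ m ih =>
    intro n l hm hn
    cases l with
    | nil => cases n <;> rfl
    | cons x xs =>
      cases n with
      | zero => simp at hn
      | succ n =>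
        simp only [pvAltGo]
        by_cases hx : x ∈ p2
        · simp only [hx, if_pos]
          rw [ih n (xs.dropWhile (· ∈ p2))
              (le_trans (List.length_dropWhile_le _ _) (by simpa using hm))
              (le_trans (List.length_dropWhile_le _ _) (by simpa using hn))]
        · simp only [hx, if_false]
          exact ih n xs (by simpa using hm) (by simpa using hn)

-- key invariant: A's fold+flush from pending run ip equals the span scan with ip glued on
theorem pvKey (p2 : List Int) :
    ∀ (n : Nat) (l : List Int) (ip : List Int), l.length ≤ n →
    (let st := List.foldl (pvStep p2) ([], ip) l
     if st.2.length ≠ 0 then st.1 ++ [st.2] else st.1) =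
      (if ip.isEmpty then pvAltGo p2 n l
       else (ip ++ l.takeWhile (· ∈ p2)) :: pvAltGo p2 n (l.dropWhile (· ∈ p2))) := by
  intro n
  induction n with
  | zero =>
    intro l ip hl
    cases l with
    | nil => cases ip <;> simp [pvAltGo]
    | cons x xs => simp at hl
  | succ n ih =>
    intro l ip hl
    cases l with
    | nil => cases ip <;> simp [pvAltGo]
    | cons x xs =>
      have hxs : xs.length ≤ n := by simpa using hl
      simp only [List.foldl_cons, pvStep]
      by_cases hx : x ∈ p2
      · have := ih xs (ip ++ [x]) hxs
        simp only [hx, if_pos] at this ⊢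
        rw [this]
        have hdw : (xs.dropWhile (· ∈ p2)).length ≤ n :=
          le_trans (List.length_dropWhile_le _ _) hxs
        cases ip <;>
          simp [pvAltGo, hx, pvAltGo_fuel p2 n (n + 1) _ hdw (le_trans hdw (Nat.le_succ n))]
      · simp only [hx, if_false]
        cases ip with
        | nil =>
          have hd : (x :: xs).length ≤ n + 1 := hl
          simpa [pvAltGo, hx,
            pvAltGo_fuel p2 n (n + 1) xs hxs (Nat.le_succ_of_le hxs)] using ih xs [] hxs
        | cons a as =>
          rw [if_pos (by simp : (a :: as).length > 0)]
          rw [pvFold_acc p2 xs ([] ++ [a :: as]) []]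
          have h0 := ih xs [] hxs
          simp only [List.isEmpty_nil, if_pos] at h0
          by_cases hlen : (List.foldl (pvStep p2) (([] : List (List Int)), ([] : List Int)) xs).2.length ≠ 0
          · rw [if_pos hlen] at h0
            simp [pvAltGo, hx, hlen, ← h0]
          · simp only [ne_eq, not_not] at hlen
            rw [if_neg (by simp [hlen])] at h0
            simp [pvAltGo, hx, hlen, ← h0]

-- ===== VERDICT (by name: the statement is the Claim_ definition above) =====
theorem pathsIntersections_spec : Claim_equal_pathsIntersections := by
  intro p1 p2 _
  show pathsIntersections p1 p2 = pathsIntersections_alt p1 p2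
  have h := pvKey p2 p1.length p1 [] (le_refl _)
  simpa [pathsIntersections, pathsIntersections_alt, pvStep] using h
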